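-- pv_equiv track=rewrite | github.com/HeYangChun/Spiders | crawler/utilities.py | convert2Filename
-- ===== SOURCE A (Python) =====
-- def convert2Filename(url):
--     specialChar=['~',
--                  '`',
--                  '!',
--                  '@',
--                  '#',
--                  '$',
--                  '%',
--                  '^',
--                  '&',
--                  '*',
--                  '(',
--                  ')',
--                  '|',
--                  '\\',
--                  ',',
--                  '/',
--                  '?',
--                  ':',
--                  ';',
--                  '"',
--                  '<',
--                  '>',
--                  '.',
--                  ]
--     for sc in specialChar:
--         url=url.replace(sc,"")
--
--     return url
-- ===== SOURCE B (Python) =====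
-- def convert2Filename(url):
--     special = set('~`!@#$%^&*()|\\,/?:;"<>.')
--     return ''.join(c for c in url if c not in special)
-- ===== Notes on version B (the rewrite author's own statement) =====
-- stated objective: simpler
-- what changed: Replaces A's 23 sequential full-string replace passes with a single filtering scan over the characters using a set membership test.
import Mathlib
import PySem

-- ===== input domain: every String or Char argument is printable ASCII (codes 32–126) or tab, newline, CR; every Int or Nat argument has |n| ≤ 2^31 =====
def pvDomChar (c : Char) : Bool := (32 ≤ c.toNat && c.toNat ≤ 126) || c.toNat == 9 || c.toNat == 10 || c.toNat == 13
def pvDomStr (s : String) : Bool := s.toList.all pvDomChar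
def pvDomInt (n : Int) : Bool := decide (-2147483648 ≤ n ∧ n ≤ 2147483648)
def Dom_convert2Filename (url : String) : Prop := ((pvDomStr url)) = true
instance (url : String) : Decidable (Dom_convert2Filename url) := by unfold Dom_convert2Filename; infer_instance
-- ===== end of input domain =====

-- B does one filtering pass over the characters instead of A's 23 sequential replace passes (simpler, same result).

-- ===== PORT A =====
def pvSpecialChar : List String :=
  ["~", "`", "!", "@", "#", "$", "%", "^", "&", "*", "(", ")", "|", "\\",
   ",", "/", "?", ":", ";", "\"", "<", ">", "."]

def convert2Filename (url : String) : String :=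
  pvSpecialChar.foldl (fun u sc => PySem.Str.replace u sc "") url

-- ===== PORT B =====
def pvSpecials : List Char := PySem.Set.ofList "~`!@#$%^&*()|\\,/?:;\"<>.".toList

def convert2Filename_alt (url : String) : String :=
  String.ofList (url.toList.filter (fun c => !(pvSpecials.contains c)))

-- ===== PRECONDITION & SPEC =====
def Spec_convert2Filename (url : String) (out : String) : Prop := out = convert2Filename_alt url
instance (url : String) (out : String) : Decidable (Spec_convert2Filename url out) := by unfold Spec_convert2Filename; infer_instance

-- ===== CLAIM (what is proved, stated in full; the proofs are below) =====
def Claim_equal_convert2Filename : Prop := ∀ (url : String), Dom_convert2Filename url → Spec_convert2Filename url (convert2Filename url)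

-- ===== LEMMAS AND PROOFS =====

-- replace.go with a singleton pattern and empty replacement is a filter
lemma go_filter (c : Char) : ∀ (fuel : Nat) (l acc : List Char), l.length ≤ fuel →
    PySem.Chars.replace.go [c] [] fuel l acc = acc.reverse ++ l.filter (fun x => x != c) := by
  intro fuel
  induction fuel with
  | zero =>
    intro l acc h
    have hl : l = [] := by cases l <;> simp_all
    subst hl
    simp [PySem.Chars.replace.go]
  | succ n ih =>
    intro l acc h
    cases l with
    | nil => simp [PySem.Chars.replace.go]
    | cons a t =>
      have ht : t.length ≤ n := by simpa using h
      by_cases hac : c = a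
      · subst hac
        simp [PySem.Chars.replace.go, List.isPrefixOf, ih t acc ht]
      · have hba : (c == a) = false := by simp [hac]
        simp [PySem.Chars.replace.go, List.isPrefixOf, hba, ih t (a :: acc) ht,
              bne, BEq.comm (a := a) (b := c)]

lemma replace_single (c : Char) (l : List Char) :
    PySem.Chars.replace l [c] [] = l.filter (fun x => x != c) := by
  simpa [PySem.Chars.replace] using go_filter c l.length l [] (le_refl _)

lemma foldl_replace_filter : ∀ (cs : List Char) (l : List Char),
    cs.foldl (fun u c => PySem.Chars.replace u [c] []) l =
      l.filter (fun x => !(cs.contains x)) := by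
  intro cs
  induction cs with
  | nil => intro l; simp
  | cons c cs ih =>
    intro l
    rw [List.foldl_cons, ih (PySem.Chars.replace l [c] []), replace_single, List.filter_filter]
    apply List.filter_congr
    intro x _
    by_cases hx : x = c
    · simp [hx]
    · simp [hx, bne]

-- lift A's string-level foldl to the character level
lemma foldl_str (scs : List String) : ∀ (u : String),
    (scs.foldl (fun u sc => PySem.Str.replace u sc "") u).toList =
      (scs.map String.toList).foldl (fun l o => PySem.Chars.replace l o []) u.toList := by
  induction scs with
  | nil => intro u; simp
  | cons s scs ih =>
    intro u
    simp only [List.foldl_cons, List.map_cons, ih, PySem.Str.toList_replace]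
    rfl

def pvChars : List Char :=
  ['~', '`', '!', '@', '#', '$', '%', '^', '&', '*', '(', ')', '|', '\\',
   ',', '/', '?', ':', ';', '"', '<', '>', '.']

lemma specialChar_map : pvSpecialChar.map String.toList = pvChars.map (fun c => [c]) := by decide

lemma specials_eq : pvSpecials = pvChars := by decide

-- ===== VERDICT (by name: the statement is the Claim_ definition above) =====
theorem convert2Filename_spec : Claim_equal_convert2Filename := by
  intro url _
  unfold Spec_convert2Filename convert2Filename convert2Filename_alt
  apply String.toList_inj.mp
  rw [foldl_str, specialChar_map, List.foldl_map, foldl_replace_filter,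
      String.toList_ofList, specials_eq]
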